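-- pv_equiv track=rewrite | github.com/Vagacoder/HackerRank | src/practice/Roblox20dec20/Q02.py | prison
-- ===== SOURCE A (Python) =====
-- def prison(n, m, h, v):
--     def widestGap(a:list)-> int:
--         n = len(a)
--         result = 0
--         curSum = 0
--         for i in range(1, n):
--             if a[i] != a[i-1] + 1:
--                 if curSum > result:
--                     result = curSum
--                 curSum = 0
--             else:
--                 curSum += 1
--         if curSum > result:
--             result = curSum
--         return result
--
--     hgap = widestGap(h)+2
--     vgap = widestGap(v)+2
--
--     return hgap * vgap
-- ===== SOURCE B (Python) =====
-- def prison(n, m, h, v):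
--     def widestGap(a):
--         if not a:
--             return 0
--         cuts = [0] + [i for i in range(1, len(a)) if a[i] != a[i - 1] + 1] + [len(a)]
--         return max(cuts[j + 1] - cuts[j] for j in range(len(cuts) - 1)) - 1
--     return (widestGap(h) + 2) * (widestGap(v) + 2)
-- ===== Notes on version B (the rewrite author's own statement) =====
-- stated objective: alternative
-- what changed: widestGap is recomputed by first collecting the break positions (i with a[i] != a[i-1]+1) as a list of cut points 0..len(a) and then taking the maximum difference between consecutive cut points minus 1, instead of A's single running-counter-with-reset scan.
import Mathlib
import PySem

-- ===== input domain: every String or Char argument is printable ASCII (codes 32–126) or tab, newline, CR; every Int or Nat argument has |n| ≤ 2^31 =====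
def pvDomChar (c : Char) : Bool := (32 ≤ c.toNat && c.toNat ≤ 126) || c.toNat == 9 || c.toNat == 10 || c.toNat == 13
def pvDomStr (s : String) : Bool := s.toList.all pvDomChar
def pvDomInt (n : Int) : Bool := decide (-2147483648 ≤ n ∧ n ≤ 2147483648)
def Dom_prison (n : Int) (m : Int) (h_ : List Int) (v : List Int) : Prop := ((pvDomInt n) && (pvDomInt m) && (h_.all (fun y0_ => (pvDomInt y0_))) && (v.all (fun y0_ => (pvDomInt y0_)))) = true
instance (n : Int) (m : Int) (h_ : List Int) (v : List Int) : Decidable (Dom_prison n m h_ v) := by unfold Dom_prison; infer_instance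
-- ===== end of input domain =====

-- B replaces A's running-counter/reset scan by collecting break positions as cut points and
-- maximising consecutive cut-point differences (objective: alternative algorithm, same cost).

-- ===== PORT A =====
-- widestGap of A: running counter of consecutive (+1)-steps, reset at each break, keep the max.
def prisonGapA (a : List Int) : Int :=
  let n : Int := (a.length : Int)
  let st :=
    (PySem.List.pyRange 1 n 1).foldl
      (fun (st : Int × Int) i =>
        if PySem.List.pyGetD a i 0 ≠ PySem.List.pyGetD a (i - 1) 0 + 1 then
          (if st.2 > st.1 then st.2 else st.1, 0)
        else
          (st.1, st.2 + 1))
      (0, 0)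
  if st.2 > st.1 then st.2 else st.1

def prison (n : Int) (m : Int) (h_ : List Int) (v : List Int) : Int :=
  (prisonGapA h_ + 2) * (prisonGapA v + 2)

-- ===== PORT B =====
-- widestGap of B: cut points 0 :: breaks ++ [len a]; answer = max consecutive difference - 1.
def prisonGapB (a : List Int) : Int :=
  if a = [] then 0
  else
    let cuts : List Int :=
      0 :: (PySem.List.pyRange 1 (a.length : Int) 1).filter
            (fun i => PySem.List.pyGetD a i 0 ≠ PySem.List.pyGetD a (i - 1) 0 + 1)
        ++ [(a.length : Int)]
    -- max(cuts[j+1]-cuts[j] for j in range(len(cuts)-1)); the list is never empty (cuts has ≥ 2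
    -- elements), so Python's max never raises and .getD 0 is never taken.
    (PySem.List.max?
        ((PySem.List.pyRange 0 ((cuts.length : Int) - 1) 1).map
          (fun j => PySem.List.pyGetD cuts (j + 1) 0 - PySem.List.pyGetD cuts j 0))
        (fun y => y)).getD 0
      - 1

def prison_alt (n : Int) (m : Int) (h_ : List Int) (v : List Int) : Int :=
  (prisonGapB h_ + 2) * (prisonGapB v + 2)

-- ===== PRECONDITION & SPEC =====
def Spec_prison (n : Int) (m : Int) (h_ : List Int) (v : List Int) (out : Int) : Prop := out = prison_alt n m h_ v
instance (n : Int) (m : Int) (h_ : List Int) (v : List Int) (out : Int) : Decidable (Spec_prison n m h_ v out) := by unfold Spec_prison; infer_instance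

-- ===== CLAIM (what is proved, stated in full; the proofs are below) =====
def Claim_equal_prison : Prop := ∀ (n : Int) (m : Int) (h_ : List Int) (v : List Int), Dom_prison n m h_ v → Spec_prison n m h_ v (prison n m h_ v)

-- ===== LEMMAS AND PROOFS =====

-- reference: maximal run of `false` flags (c = current run), matching A's counter
def recW : Int → List Bool → Int
  | c, [] => c
  | c, true :: bs => max c (recW 0 bs)
  | c, false :: bs => recW (c + 1) bs

-- reference: maximal cut-difference, prev = last cut, pos = next scanned position
def refM : Int → Int → List Bool → Int
  | prev, pos, [] => pos - prev
  | prev, pos, true :: bs => max (pos - prev) (refM pos (pos + 1) bs)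
  | prev, pos, false :: bs => refM prev (pos + 1) bs

-- successive differences of prev :: l
def dlist : Int → List Int → List Int
  | _, [] => []
  | prev, x :: l => (x - prev) :: dlist x l

-- max of the successive differences of prev :: x :: t (as B's foldl computes it)
def mdiffs : Int → List Int → Int
  | _, [] => 0
  | prev, x :: t => (dlist x t).foldl max (x - prev)

theorem recW_nonneg (bs : List Bool) : ∀ c : Int, 0 ≤ c → 0 ≤ recW c bs := by
  induction bs with
  | nil => intro c hc; simpa [recW] using hc
  | cons b bs ih =>
    intro c hc
    cases b with
    | true => have := ih 0 le_rfl; simp [recW]; omega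
    | false => exact ih (c + 1) (by omega)

theorem refM_eq_recW (bs : List Bool) :
    ∀ prev pos : Int, refM prev pos bs = recW (pos - prev - 1) bs + 1 := by
  induction bs with
  | nil => intro prev pos; simp [refM, recW]
  | cons b bs ih =>
    intro prev pos
    cases b with
    | true =>
      have h : refM pos (pos + 1) bs = recW 0 bs + 1 := by
        have := ih pos (pos + 1)
        simpa using this
      simp only [refM, recW, h]
      omega
    | false =>
      have h := ih prev (pos + 1)
      simp only [refM, recW, h]
      congr 2
      omega

theorem foldl_max_comm (l : List Int) : ∀ a b : Int, l.foldl max (max a b) = max a (l.foldl max b) := by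
  induction l with
  | nil => intro a b; simp
  | cons c l ih =>
    intro a b
    simp only [List.foldl_cons]
    rw [max_assoc, ih]

theorem mdiffs_cons (prev x : Int) (t : List Int) (ht : t ≠ []) :
    mdiffs prev (x :: t) = max (x - prev) (mdiffs x t) := by
  cases t with
  | nil => exact absurd rfl ht
  | cons y l =>
    simp only [mdiffs, dlist, List.foldl_cons]
    rw [foldl_max_comm]

-- A's loop (with the running-max ite written as `max`) equals recW over the break flags
theorem masterA (P : Int → Prop) [DecidablePred P] (l : List Int) :
    ∀ r c : Int,
      max (l.foldl
          (fun (st : Int × Int) i =>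
            if P i then (max st.1 st.2, 0) else (st.1, st.2 + 1)) (r, c)).1
        (l.foldl
          (fun (st : Int × Int) i =>
            if P i then (max st.1 st.2, 0) else (st.1, st.2 + 1)) (r, c)).2
      = max r (recW c (l.map (fun i => decide (P i)))) := by
  induction l with
  | nil =>
    intro r c
    simp only [List.foldl_nil, List.map_nil, recW]
  | cons i l ih =>
    intro r c
    simp only [List.foldl_cons, List.map_cons]
    by_cases h : P i
    · simp only [h, if_true, decide_true, recW]
      rw [ih (max r c) 0]
      omega
    · simp only [h, if_false, decide_false, recW]
      exact ih r (c + 1)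

-- B's cut-point differences over a contiguous range equal refM over the break flags
theorem masterB (P : Int → Prop) [DecidablePred P] :
    ∀ (k : ℕ) (s e prev : Int), (e - s).toNat = k → s ≤ e →
      mdiffs prev ((PySem.List.pyRange s e 1).filter (fun i => decide (P i)) ++ [e])
        = refM prev s ((PySem.List.pyRange s e 1).map (fun i => decide (P i))) := by
  intro k
  induction k with
  | zero =>
    intro s e prev hk hse
    have hes : e = s := by omega
    subst hes
    simp [PySem.List.pyRange_one_eq_nil le_rfl, mdiffs, dlist, refM]
  | succ k ih =>
    intro s e prev hk hse
    have hlt : s < e := by omega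
    rw [PySem.List.pyRange_one_cons hlt]
    simp only [List.filter_cons, List.map_cons]
    by_cases h : P s
    · simp only [h, decide_true, if_pos, refM]
      rw [List.cons_append, mdiffs_cons _ _ _ (by simp), ih (s + 1) e s (by omega) (by omega)]
    · simp only [h, decide_false, refM]
      rw [if_neg (by simp)]
      exact ih (s + 1) e prev (by omega) (by omega)

theorem dlist_eq_zipWith (rest : List Int) :
    ∀ prev : Int, List.zipWith (fun x y => y - x) (prev :: rest) rest = dlist prev rest := by
  induction rest with
  | nil => intro prev; simp [dlist]
  | cons x l ih => intro prev; simp [dlist, ← ih x]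

-- B's pyRange/pyGetD map is the list of successive differences
theorem diffs_map_eq_dlist (prev : Int) (rest : List Int) :
    (PySem.List.pyRange 0 (((prev :: rest).length : Int) - 1) 1).map
        (fun j => PySem.List.pyGetD (prev :: rest) (j + 1) 0 - PySem.List.pyGetD (prev :: rest) j 0)
      = dlist prev rest := by
  rw [← dlist_eq_zipWith]
  apply List.ext_getElem
  · simp [PySem.List.length_pyRange_one]
  · intro k h1 h2
    have hk : k < rest.length := by
      simpa [PySem.List.length_pyRange_one] using h1
    simp only [List.getElem_map, List.getElem_zipWith]
    rw [PySem.List.getElem_pyRange_one]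
    have e1 : (0 : Int) + k + 1 = ((k + 1 : ℕ) : Int) := by push_cast [Nat.cast_add]; ring
    have e2 : (0 : Int) + k = ((k : ℕ) : Int) := by push_cast; ring
    rw [e1, e2, PySem.List.pyGetD_natCast, PySem.List.pyGetD_natCast]
    rw [List.getD_eq_getElem _ _ (by simp; omega), List.getD_eq_getElem _ _ (by simp; omega)]
    simp

-- the per-axis equivalence
theorem gap_eq (a : List Int) : prisonGapA a = prisonGapB a := by
  by_cases ha : a = []
  · subst ha; decide
  · have hlen : 1 ≤ (a.length : Int) := by
      have : a.length ≠ 0 := fun h => ha (List.length_eq_zero_iff.mp h)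
      omega
    have hfin : ∀ st : Int × Int, (if st.2 > st.1 then st.2 else st.1) = max st.1 st.2 := by
      intro st; split_ifs <;> omega
    set P : Int → Prop := fun i => PySem.List.pyGetD a i 0 ≠ PySem.List.pyGetD a (i - 1) 0 + 1 with hP
    have hA : prisonGapA a
        = max 0 (recW 0 ((PySem.List.pyRange 1 (a.length : Int) 1).map (fun i => decide (P i)))) := by
      unfold prisonGapA
      simp only [hfin]
      exact masterA P (PySem.List.pyRange 1 (a.length : Int) 1) 0 0
    set rest : List Int :=
      (PySem.List.pyRange 1 (a.length : Int) 1).filter (fun i => decide (P i)) ++ [(a.length : Int)]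
      with hrest
    have hrest_ne : rest ≠ [] := by simp [hrest]
    have hB : prisonGapB a = mdiffs 0 rest - 1 := by
      unfold prisonGapB
      rw [if_neg ha]
      show (PySem.List.max?
          ((PySem.List.pyRange 0 ((((0 :: rest : List Int).length : Int)) - 1) 1).map
            (fun j => PySem.List.pyGetD (0 :: rest) (j + 1) 0 - PySem.List.pyGetD (0 :: rest) j 0))
          (fun y => y)).getD 0 - 1 = mdiffs 0 rest - 1
      rw [diffs_map_eq_dlist 0 rest]
      obtain ⟨x, t, hxt⟩ : ∃ x t, rest = x :: t := by
        cases hr : rest with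
        | nil => exact absurd hr hrest_ne
        | cons x t => exact ⟨x, t, rfl⟩
      rw [hxt]
      simp only [dlist, mdiffs]
      rw [PySem.List.max?_id_cons]
      rfl
    rw [hA, hB, hrest,
      masterB P ((a.length : Int) - 1).toNat 1 (a.length : Int) 0 (by omega) (by omega),
      refM_eq_recW]
    have h0 : (1 : Int) - 0 - 1 = 0 := by norm_num
    rw [h0]
    have hnn := recW_nonneg
      ((PySem.List.pyRange 1 (a.length : Int) 1).map (fun i => decide (P i))) 0 le_rfl
    omega

-- ===== VERDICT (by name: the statement is the Claim_ definition above) =====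
theorem prison_spec : Claim_equal_prison := by
  intro n m h_ v _
  unfold Spec_prison prison prison_alt
  rw [gap_eq h_, gap_eq v]
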